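-- pv_equiv track=rewrite | github.com/haolunc/ARC-RL | reference_solutions/solutions/ea32f347.py | transform
-- ===== SOURCE A (Python) =====
-- def transform(grid):
--
--     h = len(grid)
--     w = len(grid[0])
--     visited = [[False] * w for _ in range(h)]
--     components = []
--
--     dirs = [(1, 0), (-1, 0), (0, 1), (0, -1)]
--
--     for i in range(h):
--         for j in range(w):
--             if grid[i][j] == 5 and not visited[i][j]:
--
--                 stack = [(i, j)]
--                 visited[i][j] = True
--                 comp = []
--                 while stack:
--                     x, y = stack.pop()
--                     comp.append((x, y))
--                     for dx, dy in dirs: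
--                         nx, ny = x + dx, y + dy
--                         if 0 <= nx < h and 0 <= ny < w:
--                             if not visited[nx][ny] and grid[nx][ny] == 5:
--                                 visited[nx][ny] = True
--                                 stack.append((nx, ny))
--                 components.append(comp)
--
--     components.sort(key=len, reverse=True)
--
--     colour_order = [1, 4, 2]
--
--     new_grid = [row[:] for row in grid]
--
--     for idx, comp in enumerate(components):
--         if idx >= len(colour_order):
--             break
--         col = colour_order[idx]
--         for x, y in comp:
--             new_grid[x][y] = col
--
--     return new_grid
-- ===== SOURCE B (Python) =====
-- def transform(grid):
--     h, w = len(grid), len(grid[0])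
--     fives = [(i, j) for i in range(h) for j in range(w) if grid[i][j] == 5]
--     fiveset = set(fives)
--     seen = set()
--     comps = []
--     for cell in fives:
--         if cell in seen:
--             continue
--         seen.add(cell)
--         queue = [cell]
--         comp = []
--         while queue:
--             x, y = queue.pop(0)
--             comp.append((x, y))
--             for nb in ((x + 1, y), (x - 1, y), (x, y + 1), (x, y - 1)):
--                 if nb in fiveset and nb not in seen:
--                     seen.add(nb)
--                     queue.append(nb)
--         comps.append(comp)
--     comps.sort(key=len, reverse=True)
--     out = [row[:] for row in grid]
--     for colour, comp in zip((1, 4, 2), comps):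
--         for x, y in comp:
--             out[x][y] = colour
--     return out
-- ===== Notes on version B (the rewrite author's own statement) =====
-- stated objective: alternative
-- what changed: A scans the grid with nested loops, keeps a boolean visited matrix and grows each component by depth-first search on an explicit stack; B first flattens the grid into a row-major list of 5-cells, keeps a hash set of seen coordinates (and a set of 5-cells replacing the bounds-and-value test), grows each component breadth-first with a pop-from-front queue, and recolours by zipping the colour list with the sorted components instead of A's enumerate/break loop.
import Mathlib
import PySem

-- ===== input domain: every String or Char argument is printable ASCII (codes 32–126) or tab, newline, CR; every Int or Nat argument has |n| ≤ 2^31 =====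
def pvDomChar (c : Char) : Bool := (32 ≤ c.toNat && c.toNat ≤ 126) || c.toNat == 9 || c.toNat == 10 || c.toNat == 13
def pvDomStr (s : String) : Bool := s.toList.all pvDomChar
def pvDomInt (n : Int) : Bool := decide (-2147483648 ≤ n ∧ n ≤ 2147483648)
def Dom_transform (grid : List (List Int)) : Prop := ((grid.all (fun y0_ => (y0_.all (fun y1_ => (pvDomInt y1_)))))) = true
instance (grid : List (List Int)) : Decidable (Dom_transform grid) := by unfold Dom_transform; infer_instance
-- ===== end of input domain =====

-- B replaces A's visited matrix + stack DFS over nested row/column scans by a flattened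
-- row-major list of 5-cells, a seen-set of coordinates and a pop-from-front BFS queue,
-- and recolours by zipping the colours with the sorted components; objective: alternative.

-- ===== PORT A =====
-- grid[x][y] reads and visited[x][y] / new_grid[x][y] writes of A
def gval (g : List (List Int)) (x y : Int) : Int :=
  (PySem.List.pyGet? ((PySem.List.pyGet? g x).getD []) y).getD 0

def vval (v : List (List Bool)) (x y : Int) : Bool :=
  (PySem.List.pyGet? ((PySem.List.pyGet? v x).getD []) y).getD false

def vmark (v : List (List Bool)) (x y : Int) : List (List Bool) :=
  if 0 ≤ x ∧ 0 ≤ y then v.modify x.toNat (fun row => row.set y.toNat true) else v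

def gset (g : List (List Int)) (x y : Int) (c : Int) : List (List Int) :=
  if 0 ≤ x ∧ 0 ≤ y then g.modify x.toNat (fun row => row.set y.toNat c) else g

def dirsA : List (Int × Int) := [(1, 0), (-1, 0), (0, 1), (0, -1)]

-- body of A's 'for dx, dy in dirs' loop (acc = (visited, stack))
def stepA (grid : List (List Int)) (h w x y : Int)
    (acc : List (List Bool) × List (Int × Int)) (d : Int × Int) :
    List (List Bool) × List (Int × Int) :=
  let nx := x + d.1
  let ny := y + d.2
  if 0 ≤ nx ∧ nx < h ∧ 0 ≤ ny ∧ ny < w then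
    if vval acc.1 nx ny = false ∧ gval grid nx ny = 5 then
      (vmark acc.1 nx ny, acc.2 ++ [(nx, ny)])
    else acc
  else acc

-- A's 'while stack:' loop; stack.pop() pops the last element (fuel only makes it total)
def floodA (grid : List (List Int)) (h w : Int) :
    Nat → List (Int × Int) → List (List Bool) → List (Int × Int) →
    List (List Bool) × List (Int × Int)
  | 0, _, v, comp => (v, comp)
  | fuel + 1, stack, v, comp =>
    match stack.getLast? with
    | none => (v, comp)
    | some (x, y) =>
      let r := dirsA.foldl (stepA grid h w x y) (v, stack.dropLast)
      floodA grid h w fuel r.2 r.1 (comp ++ [(x, y)])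

def colourOrder : List Int := [1, 4, 2]

-- new_grid[x][y] = col for (x, y) in comp
def paint (g : List (List Int)) (col : Int) (comp : List (Int × Int)) : List (List Int) :=
  comp.foldl (fun g p => gset g p.1 p.2 col) g

-- A's 'for idx, comp in enumerate(components): if idx >= len(colour_order): break'
def recolorA (g : List (List Int)) : Nat → List (List (Int × Int)) → List (List Int)
  | _, [] => g
  | idx, c :: cs =>
    if colourOrder.length ≤ idx then g
    else recolorA (paint g (PySem.List.pyGetD colourOrder (idx : Int) 0) c) (idx + 1) cs

def transform (grid : List (List Int)) : List (List Int) :=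
  let h : Int := grid.length
  let w : Int := (grid.headI).length
  let scan := (PySem.List.pyRange 0 h 1).foldl (fun st i =>
      (PySem.List.pyRange 0 w 1).foldl (fun st j =>
        if gval grid i j = 5 ∧ vval st.1 i j = false then
          let r := floodA grid h w (h.toNat * w.toNat + 1) [(i, j)] (vmark st.1 i j) []
          (r.1, st.2 ++ [r.2])
        else st) st)
      (List.replicate h.toNat (List.replicate w.toNat false), ([] : List (List (Int × Int))))
  recolorA grid 0 (PySem.List.sorted scan.2 (fun c => c.length) true)

-- ===== PORT B =====
-- the comprehension [(i, j) for i in range(h) for j in range(w) if grid[i][j] == 5]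
-- (indices produced by range are nonnegative, so grid[i][j] is read with getD; exact under Pre_)
def fivesOf (grid : List (List Int)) : List (Int × Int) :=
  (PySem.List.pyRange 0 (grid.length : Int) 1).flatMap (fun i =>
    ((PySem.List.pyRange 0 ((grid.headI).length : Int) 1).filter (fun j =>
      decide ((grid.getD i.toNat []).getD j.toNat 0 = 5))).map (fun j => (i, j)))

def nbrsOf (x y : Int) : List (Int × Int) := [(x + 1, y), (x - 1, y), (x, y + 1), (x, y - 1)]

-- one neighbour test of the BFS: 'if nb in fiveset and nb not in seen' (st = (seen, queue))
def probe (fiveset : PySem.Set (Int × Int))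
    (st : PySem.Set (Int × Int) × List (Int × Int)) (nb : Int × Int) :
    PySem.Set (Int × Int) × List (Int × Int) :=
  if PySem.Set.contains fiveset nb = true ∧ PySem.Set.contains st.1 nb = false then
    (PySem.Set.add st.1 nb, st.2 ++ [nb])
  else st

-- B's 'while queue:' with queue.pop(0) (fuel only makes the recursion total)
def bfs (fiveset : PySem.Set (Int × Int)) :
    Nat → List (Int × Int) → List (Int × Int) → PySem.Set (Int × Int) →
    PySem.Set (Int × Int) × List (Int × Int)
  | 0, _, comp, seen => (seen, comp)
  | _ + 1, [], comp, seen => (seen, comp)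
  | f + 1, (x, y) :: rest, comp, seen =>
    let r := (nbrsOf x y).foldl (probe fiveset) (seen, rest)
    bfs fiveset f r.2 (comp ++ [(x, y)]) r.1

-- out[x][y] = colour (coordinates coming from components are always in range and nonnegative)
def putCell (g : List (List Int)) (c : Int) (p : Int × Int) : List (List Int) :=
  g.modify p.1.toNat (fun row => row.set p.2.toNat c)

def transform_alt (grid : List (List Int)) : List (List Int) :=
  let fives := fivesOf grid
  let fiveset : PySem.Set (Int × Int) := PySem.Set.ofList fives
  let scan := fives.foldl
    (fun (st : PySem.Set (Int × Int) × List (List (Int × Int))) cell =>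
      if PySem.Set.contains st.1 cell = true then st
      else
        let r := bfs fiveset (grid.length * (grid.headI).length + 1) [cell] []
          (PySem.Set.add st.1 cell)
        (r.1, st.2 ++ [r.2])) ([], [])
  (([1, 4, 2] : List Int).zip (PySem.List.sorted scan.2 (fun c => c.length) true)).foldl
    (fun g cc => cc.2.foldl (fun g p => putCell g cc.1 p) g) grid

-- ===== PRECONDITION & SPEC =====
-- Pre_ excludes exactly the inputs on which Python A raises: the empty grid (grid[0] is an
-- IndexError) and grids with a row shorter than the first row (grid[i][j] IndexError).
def Pre_transform (grid : List (List Int)) : Prop :=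
  grid ≠ [] ∧ ∀ r ∈ grid, (grid.headI).length ≤ r.length

instance (grid : List (List Int)) : Decidable (Pre_transform grid) := by
  unfold Pre_transform; infer_instance

def pvWitness_transform : List (List Int) := [[5, 0, 5], [5, 5, 0]]

def Spec_transform (grid : List (List Int)) (out : List (List Int)) : Prop := out = transform_alt grid
instance (grid : List (List Int)) (out : List (List Int)) : Decidable (Spec_transform grid out) := by unfold Spec_transform; infer_instance

-- ===== CLAIM (what is proved, stated in full; the proofs are below) =====
def Claim_equal_transform : Prop := ∀ (grid : List (List Int)), Dom_transform grid → Pre_transform grid → Spec_transform grid (transform grid)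

-- ===== LEMMAS AND PROOFS =====

-- ---------- proof-side definitions ----------
def inb (h w : Int) (c : Int × Int) : Prop := 0 ≤ c.1 ∧ c.1 < h ∧ 0 ≤ c.2 ∧ c.2 < w

def okc (grid : List (List Int)) (h w : Int) (c : Int × Int) : Prop :=
  inb h w c ∧ gval grid c.1 c.2 = 5

def dims (h w : Int) (v : List (List Bool)) : Prop :=
  v.length = h.toNat ∧ ∀ r ∈ v, r.length = w.toNat

def cnt (v : List (List Bool)) : Nat := (v.map (fun r => r.count false)).sum

-- the unvisited predicate of A's matrix
def freeV (v0 : List (List Bool)) (c : Int × Int) : Prop := vval v0 c.1 c.2 = false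

-- reachability through 5-cells whose 'free' predicate holds (shared by both analyses)
inductive ReachG (grid : List (List Int)) (h w : Int) (free : Int × Int → Prop)
    (s : Int × Int) : (Int × Int) → Prop
  | base : ReachG grid h w free s s
  | step {c n : Int × Int} : ReachG grid h w free s c → n ∈ nbrsOf c.1 c.2 →
      okc grid h w n → free n → ReachG grid h w free s n

theorem reach_mono {grid : List (List Int)} {h w : Int} {f1 f2 : Int × Int → Prop}
    {s c : Int × Int} (hf : ∀ d, okc grid h w d → (f1 d → f2 d))
    (hr : ReachG grid h w f1 s c) : ReachG grid h w f2 s c := by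
  induction hr with
  | base => exact ReachG.base
  | step hrc hn hok hfree ih => exact ReachG.step ih hn hok (hf _ hok hfree)

theorem reach_ok {grid : List (List Int)} {h w : Int} {free : Int × Int → Prop}
    {s c : Int × Int} (hs : okc grid h w s) (hr : ReachG grid h w free s c) :
    okc grid h w c := by
  induction hr with
  | base => exact hs
  | step _ _ hok _ _ => exact hok

-- ---------- vval / vmark ----------
theorem vval_nonneg_eq (v : List (List Bool)) (x y : Int) (hx : 0 ≤ x) (hy : 0 ≤ y) :
    vval v x y = ((v[x.toNat]?.getD [])[y.toNat]?).getD false := by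
  simp [vval, PySem.List.pyGet?_of_nonneg _ hx, PySem.List.pyGet?_of_nonneg _ hy]

theorem vmark_nonneg_eq (v : List (List Bool)) (x y : Int) (hx : 0 ≤ x) (hy : 0 ≤ y) :
    vmark v x y = v.modify x.toNat (fun row => row.set y.toNat true) := by
  simp [vmark, hx, hy]

theorem dims_vmark {h w : Int} {v : List (List Bool)} (hd : dims h w v) (x y : Int) :
    dims h w (vmark v x y) := by
  obtain ⟨h1, h2⟩ := hd
  unfold vmark
  split
  · refine ⟨by simpa using h1, ?_⟩
    intro r hr
    rw [List.mem_iff_getElem] at hr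
    obtain ⟨i, hi, rfl⟩ := hr
    rw [List.getElem_modify]
    have hi' : i < v.length := by simpa using hi
    split
    · simpa using h2 _ (List.getElem_mem hi')
    · exact h2 _ (List.getElem_mem hi')
  · exact ⟨h1, h2⟩

theorem vval_vmark {h w : Int} {v : List (List Bool)} (hd : dims h w v)
    {x y : Int} (hin : inb h w (x, y)) (a b : Int) (hab : inb h w (a, b)) :
    vval (vmark v x y) a b = if a = x ∧ b = y then true else vval v a b := by
  obtain ⟨hx0, hxh, hy0, hyw⟩ := hin
  obtain ⟨ha0, hah, hb0, hbw⟩ := hab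
  obtain ⟨hl, hrl⟩ := hd
  simp only at hx0 hxh hy0 hyw ha0 hah hb0 hbw
  have halt : a.toNat < v.length := by omega
  have hmlen : a.toNat < (v.modify x.toNat (fun row => row.set y.toNat true)).length := by
    simpa using halt
  have hrow : (v[a.toNat]).length = w.toNat := hrl _ (List.getElem_mem halt)
  rw [vmark_nonneg_eq v x y hx0 hy0, vval_nonneg_eq _ a b ha0 hb0,
      vval_nonneg_eq v a b ha0 hb0,
      List.getElem?_eq_getElem halt, List.getElem?_eq_getElem hmlen,
      Option.getD_some, Option.getD_some, List.getElem_modify]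
  by_cases hax : a = x
  · subst hax
    rw [if_pos rfl, List.getElem?_set]
    by_cases hby : b = y
    · subst hby
      have hb2 : b.toNat < (v[a.toNat]).length := by omega
      simp [hb2]
    · have hne : b.toNat ≠ y.toNat := by omega
      simp [hby, Ne.symm hne]
  · have hne : x.toNat ≠ a.toNat := by omega
    rw [if_neg hne]
    simp [hax]

theorem vmark_char {h w : Int} {v : List (List Bool)} (hd : dims h w v) {s : Int × Int}
    (hins : inb h w s) :
    ∀ c : Int × Int, inb h w c →
      vval (vmark v s.1 s.2) c.1 c.2 = if c = s then true else vval v c.1 c.2 := by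
  intro c hc
  have hins' : inb h w (s.1, s.2) := hins
  rw [vval_vmark hd hins' c.1 c.2 hc]
  by_cases hcs : c = s
  · rw [if_pos (by rw [hcs]; exact ⟨rfl, rfl⟩), if_pos hcs]
  · rw [if_neg (by intro hcc; exact hcs (Prod.ext hcc.1 hcc.2)), if_neg hcs]

-- ---------- counting (A's fuel measure) ----------
theorem count_false_set (l : List Bool) (j : Nat) (hj : l[j]? = some false) :
    (l.set j true).count false + 1 = l.count false := by
  induction l generalizing j with
  | nil => simp at hj
  | cons c t ih =>
    cases j with
    | zero =>
      simp only [List.getElem?_cons_zero, Option.some_inj] at hj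
      subst hj
      simp
    | succ j =>
      simp only [List.getElem?_cons_succ] at hj
      simp only [List.set_cons_succ, List.count_cons]
      have := ih j hj
      omega

theorem cnt_vmark {h w : Int} {v : List (List Bool)} (hd : dims h w v)
    {x y : Int} (hin : inb h w (x, y)) (hf : vval v x y = false) :
    cnt (vmark v x y) + 1 = cnt v := by
  obtain ⟨hx0, hxh, hy0, hyw⟩ := hin
  obtain ⟨hl, hrl⟩ := hd
  simp only at hx0 hxh hy0 hyw
  have hxlt : x.toNat < v.length := by omega
  have hrow : (v[x.toNat]).length = w.toNat := hrl _ (List.getElem_mem hxlt)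
  rw [vval_nonneg_eq v x y hx0 hy0, List.getElem?_eq_getElem hxlt, Option.getD_some] at hf
  have hylt : y.toNat < (v[x.toNat]).length := by omega
  rw [List.getElem?_eq_getElem hylt, Option.getD_some] at hf
  have hent : (v[x.toNat])[y.toNat]? = some false := by
    rw [List.getElem?_eq_getElem hylt, hf]
  rw [vmark_nonneg_eq v x y hx0 hy0, List.modify_eq_take_cons_drop hxlt]
  conv_rhs => rw [← List.take_append_drop x.toNat v, List.drop_eq_getElem_cons hxlt]
  unfold cnt
  simp only [List.map_append, List.map_cons, List.sum_append, List.sum_cons]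
  have := count_false_set (v[x.toNat]) y.toNat hent
  omega

theorem cnt_le {h w : Int} {v : List (List Bool)} (hd : dims h w v) :
    cnt v ≤ h.toNat * w.toNat := by
  obtain ⟨hl, hrl⟩ := hd
  have h1 : ∀ x ∈ v.map (fun r => r.count false), x ≤ w.toNat := by
    intro x hx
    rw [List.mem_map] at hx
    obtain ⟨r, hr, rfl⟩ := hx
    exact le_trans (List.count_le_length) (le_of_eq (hrl r hr))
  calc cnt v ≤ (v.map (fun r => r.count false)).length • w.toNat :=
        List.sum_le_card_nsmul _ _ h1
    _ = h.toNat * w.toNat := by simp [hl]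

-- ---------- 2-D extensionality (for paint_perm) ----------
theorem ext2 {γ : Type} (g₁ g₂ : List (List γ)) (hl : g₁.length = g₂.length)
    (he : ∀ i j : Nat, (g₁[i]?.getD [])[j]? = (g₂[i]?.getD [])[j]?) : g₁ = g₂ := by
  apply List.ext_getElem hl
  intro i h₁ h₂
  apply List.ext_getElem?
  intro j
  have := he i j
  rwa [List.getElem?_eq_getElem h₁, List.getElem?_eq_getElem h₂, Option.getD_some,
      Option.getD_some] at this

-- ---------- gset / paint ----------
def gentry (g : List (List Int)) (i j : Nat) : Option Int := (g[i]?.getD [])[j]?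

theorem length_gset (g : List (List Int)) (x y c : Int) : (gset g x y c).length = g.length := by
  unfold gset; split <;> simp

theorem gentry_gset (g : List (List Int)) (x y c : Int) (i j : Nat) :
    gentry (gset g x y c) i j =
      if ((i : Int), (j : Int)) = (x, y) then (gentry g i j).map (fun _ => c)
      else gentry g i j := by
  unfold gset gentry
  split
  · rename_i hxy
    obtain ⟨hx0, hy0⟩ := hxy
    by_cases hi : i < g.length
    · have hmi : i < (g.modify x.toNat (fun row => row.set y.toNat c)).length := by simpa using hi
      rw [List.getElem?_eq_getElem hi, List.getElem?_eq_getElem hmi, Option.getD_some,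
          Option.getD_some, List.getElem_modify]
      by_cases hxi : x.toNat = i
      · rw [if_pos hxi, List.getElem?_set]
        by_cases hyj : y.toNat = j
        · by_cases hjl : j < (g[i]).length
          · rw [if_pos hyj, if_pos (by omega)]
            rw [if_pos (by simp [Prod.ext_iff]; omega)]
            rw [List.getElem?_eq_getElem hjl]
            simp
          · rw [if_pos hyj, if_neg (by omega)]
            rw [if_pos (by simp [Prod.ext_iff]; omega)]
            rw [List.getElem?_eq_none (by omega)]
            simp
        · rw [if_neg hyj, if_neg (by simp [Prod.ext_iff]; omega)]
      · rw [if_neg hxi, if_neg (by simp [Prod.ext_iff]; omega)]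
    · have e₁ : g[i]? = none := List.getElem?_eq_none (by omega)
      have e₂ : (g.modify x.toNat (fun row => row.set y.toNat c))[i]? = none :=
        List.getElem?_eq_none (by simpa using hi)
      rw [e₁, e₂]
      simp only [Option.getD_none, List.getElem?_nil]
      split <;> simp
  · rename_i hxy
    rw [if_neg]
    intro hc
    rw [Prod.ext_iff] at hc
    simp only at hc
    exact hxy ⟨by omega, by omega⟩

theorem gentry_paint (g : List (List Int)) (col : Int) (comp : List (Int × Int)) (i j : Nat) :
    gentry (paint g col comp) i j =
      if ((i : Int), (j : Int)) ∈ comp then (gentry g i j).map (fun _ => col)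
      else gentry g i j := by
  induction comp generalizing g with
  | nil => simp [paint]
  | cons p ps ih =>
    have hstep : paint g col (p :: ps) = paint (gset g p.1 p.2 col) col ps := rfl
    rw [hstep, ih, gentry_gset]
    by_cases hps : ((i : Int), (j : Int)) ∈ ps
    · rw [if_pos hps, if_pos (List.mem_cons_of_mem _ hps)]
      split <;> cases gentry g i j <;> simp
    · rw [if_neg hps]
      by_cases hp : ((i : Int), (j : Int)) = p
      · rw [if_pos (by simpa using hp), if_pos (by simp [hp])]
      · rw [if_neg (by simpa using hp), if_neg (by simp [hp, hps])]

theorem length_paint (g : List (List Int)) (col : Int) (comp : List (Int × Int)) :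
    (paint g col comp).length = g.length := by
  induction comp generalizing g with
  | nil => rfl
  | cons p ps ih =>
    have hstep : paint g col (p :: ps) = paint (gset g p.1 p.2 col) col ps := rfl
    rw [hstep, ih, length_gset]

theorem paint_perm (g : List (List Int)) (col : Int) {c₁ c₂ : List (Int × Int)}
    (hp : c₁.Perm c₂) : paint g col c₁ = paint g col c₂ := by
  apply ext2 _ _ (by rw [length_paint, length_paint])
  intro i j
  have h₁ := gentry_paint g col c₁ i j
  have h₂ := gentry_paint g col c₂ i j
  unfold gentry at h₁ h₂
  rw [h₁, h₂]
  rw [if_congr (iff_of_eq (congrArg _ rfl)) rfl rfl]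
  congr 1
  exact propext ⟨fun hh => hp.mem_iff.mp hh, fun hh => hp.mem_iff.mpr hh⟩ ▸ rfl

-- B's inner recolour loop is paint, on nonnegative coordinates
theorem foldl_putCell (c : Int) (comp : List (Int × Int)) (g : List (List Int))
    (hpos : ∀ p ∈ comp, 0 ≤ p.1 ∧ 0 ≤ p.2) :
    comp.foldl (fun g p => putCell g c p) g = paint g c comp := by
  induction comp generalizing g with
  | nil => rfl
  | cons p ps ih =>
    have h1 : putCell g c p = gset g p.1 p.2 c := by
      unfold putCell gset
      rw [if_pos (hpos p List.mem_cons_self)]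
    have h2 : paint g c (p :: ps) = paint (gset g p.1 p.2 c) c ps := rfl
    rw [List.foldl_cons, h1, h2, ih _ (fun q hq => hpos q (List.mem_cons_of_mem _ hq))]

-- ---------- the worklist invariant for A (matrix visited) ----------
def WInv (grid : List (List Int)) (h w : Int) (v0 : List (List Bool)) (s : Int × Int)
    (v : List (List Bool)) (P C : List (Int × Int)) : Prop :=
  dims h w v ∧
  (∀ c : Int × Int, inb h w c → (vval v c.1 c.2 = true ↔ vval v0 c.1 c.2 = true ∨ c ∈ C ++ P)) ∧
  (C ++ P).Nodup ∧
  (∀ c ∈ C ++ P, okc grid h w c ∧ vval v0 c.1 c.2 = false ∧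
    ReachG grid h w (freeV v0) s c) ∧
  (∀ c ∈ C, ∀ n ∈ nbrsOf c.1 c.2, okc grid h w n → vval v n.1 n.2 = true)

-- one neighbour step, normalised form of A's direction loop body (proof-side only)
def stepP (grid : List (List Int)) (h w : Int)
    (acc : List (List Bool) × List (Int × Int)) (n : Int × Int) :
    List (List Bool) × List (Int × Int) :=
  if 0 ≤ n.1 ∧ n.1 < h ∧ 0 ≤ n.2 ∧ n.2 < w ∧ gval grid n.1 n.2 = 5 ∧ vval acc.1 n.1 n.2 = false then
    (vmark acc.1 n.1 n.2, acc.2 ++ [n])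
  else acc

theorem foldP_post (grid : List (List Int)) (h w : Int) :
    ∀ (ns : List (Int × Int)) (v : List (List Bool)) (P : List (Int × Int)), dims h w v →
    ∃ new : List (Int × Int),
      (ns.foldl (stepP grid h w) (v, P)).2 = P ++ new ∧ new.Nodup ∧
      dims h w (ns.foldl (stepP grid h w) (v, P)).1 ∧
      (∀ c : Int × Int, inb h w c →
        (vval (ns.foldl (stepP grid h w) (v, P)).1 c.1 c.2 = true ↔
          vval v c.1 c.2 = true ∨ c ∈ new)) ∧
      (∀ n ∈ new, n ∈ ns ∧ okc grid h w n ∧ vval v n.1 n.2 = false) ∧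
      (∀ n ∈ ns, okc grid h w n → vval (ns.foldl (stepP grid h w) (v, P)).1 n.1 n.2 = true) ∧
      cnt v = cnt (ns.foldl (stepP grid h w) (v, P)).1 + new.length := by
  intro ns
  induction ns with
  | nil =>
    intro v P hd
    exact ⟨[], by simp, by simp, hd, by simp, by simp, by simp, by simp⟩
  | cons n rest ih =>
    intro v P hd
    by_cases hg : 0 ≤ n.1 ∧ n.1 < h ∧ 0 ≤ n.2 ∧ n.2 < w ∧ gval grid n.1 n.2 = 5 ∧
        vval v n.1 n.2 = false
    · have hstep : stepP grid h w (v, P) n = (vmark v n.1 n.2, P ++ [n]) := by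
        unfold stepP; rw [if_pos hg]
      have hfold : (n :: rest).foldl (stepP grid h w) (v, P) =
          rest.foldl (stepP grid h w) (vmark v n.1 n.2, P ++ [n]) := by
        rw [List.foldl_cons, hstep]
      have hinb : inb h w n := ⟨hg.1, hg.2.1, hg.2.2.1, hg.2.2.2.1⟩
      have hinb' : inb h w (n.1, n.2) := hinb
      have hokn : okc grid h w n := ⟨hinb, hg.2.2.2.2.1⟩
      have hvf : vval v n.1 n.2 = false := hg.2.2.2.2.2
      have hmarkchar : ∀ c : Int × Int, inb h w c →
          vval (vmark v n.1 n.2) c.1 c.2 = if c = n then true else vval v c.1 c.2 := by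
        intro c hc
        have := vval_vmark hd hinb' c.1 c.2 hc
        rw [this]
        by_cases hcn : c = n
        · rw [if_pos (by rw [hcn]; exact ⟨rfl, rfl⟩), if_pos hcn]
        · rw [if_neg (by intro hcc; exact hcn (Prod.ext hcc.1 hcc.2)), if_neg hcn]
      obtain ⟨new', e2, nodup', dims', char', props', proc', cnt'⟩ :=
        ih (vmark v n.1 n.2) (P ++ [n]) (dims_vmark hd n.1 n.2)
      rw [hfold]
      refine ⟨n :: new', ?_, ?_, dims', ?_, ?_, ?_, ?_⟩
      · rw [e2]; simp
      · refine List.nodup_cons.mpr ⟨?_, nodup'⟩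
        intro hmem
        have := (props' n hmem).2.2
        rw [hmarkchar n hinb] at this
        simp at this
      · intro c hc
        rw [char' c hc, hmarkchar c hc]
        by_cases hcn : c = n
        · simp [hcn]
        · simp [hcn]
      · intro m hm
        rcases List.mem_cons.mp hm with rfl | hm'
        · exact ⟨List.mem_cons_self, hokn, hvf⟩
        · obtain ⟨hm1, hm2, hm3⟩ := props' m hm'
          refine ⟨List.mem_cons_of_mem _ hm1, hm2, ?_⟩
          rw [hmarkchar m hm2.1] at hm3
          by_cases hmn : m = n
          · rw [if_pos hmn] at hm3; exact absurd hm3 (by simp)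
          · rwa [if_neg hmn] at hm3
      · intro m hm hok
        rcases List.mem_cons.mp hm with rfl | hm'
        · have := (char' m hok.1).mpr (Or.inl (by rw [hmarkchar m hok.1, if_pos rfl]))
          exact this
        · exact proc' m hm' hok
      · have hc1 := cnt_vmark hd hinb' hvf
        simp only [List.length_cons]
        omega
    · have hstep : stepP grid h w (v, P) n = (v, P) := by
        unfold stepP; rw [if_neg hg]
      have hfold : (n :: rest).foldl (stepP grid h w) (v, P) =
          rest.foldl (stepP grid h w) (v, P) := by
        rw [List.foldl_cons, hstep]
      obtain ⟨new, e2, nodup', dims', char', props', proc', cnt'⟩ := ih v P hd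
      rw [hfold]
      refine ⟨new, e2, nodup', dims', char', ?_, ?_, cnt'⟩
      · intro m hm
        obtain ⟨hm1, hm2, hm3⟩ := props' m hm
        exact ⟨List.mem_cons_of_mem _ hm1, hm2, hm3⟩
      · intro m hm hok
        rcases List.mem_cons.mp hm with rfl | hm'
        · have hvt : vval v m.1 m.2 = true := by
            rcases Bool.eq_false_or_eq_true (vval v m.1 m.2) with ht | hf
            · exact ht
            · exact absurd ⟨hok.1.1, hok.1.2.1, hok.1.2.2.1, hok.1.2.2.2, hok.2, hf⟩ hg
          exact (char' m hok.1).mpr (Or.inl hvt)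
        · exact proc' m hm' hok

-- A's direction loop is the same pass
theorem stepA_eq (grid : List (List Int)) (h w x y : Int)
    (acc : List (List Bool) × List (Int × Int)) (d : Int × Int) :
    stepA grid h w x y acc d = stepP grid h w acc (x + d.1, y + d.2) := by
  unfold stepA stepP
  dsimp only
  split_ifs with h1 h2 h3 h3 <;> first | rfl | (exfalso; tauto)

theorem foldA_eq (grid : List (List Int)) (h w x y : Int)
    (acc : List (List Bool) × List (Int × Int)) :
    dirsA.foldl (stepA grid h w x y) acc = (nbrsOf x y).foldl (stepP grid h w) acc := by
  have hmap : nbrsOf x y = dirsA.map (fun d => (x + d.1, y + d.2)) := by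
    simp [nbrsOf, dirsA, sub_eq_add_neg]
  rw [hmap, List.foldl_map]
  congr 1
  funext a d
  exact stepA_eq grid h w x y a d

theorem winv_step {grid : List (List Int)} {h w : Int} {v0 v : List (List Bool)}
    {s p : Int × Int} {P P' C : List (Int × Int)}
    (hI : WInv grid h w v0 s v P C) (hPp : P.Perm (p :: P')) (L : List (Int × Int)) :
    ∃ new : List (Int × Int),
      ((nbrsOf p.1 p.2).foldl (stepP grid h w) (v, L)).2 = L ++ new ∧
      WInv grid h w v0 s ((nbrsOf p.1 p.2).foldl (stepP grid h w) (v, L)).1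
        (P' ++ new) (C ++ [p]) ∧
      P'.length + new.length + cnt ((nbrsOf p.1 p.2).foldl (stepP grid h w) (v, L)).1 + 1 =
        P.length + cnt v := by
  obtain ⟨hdv, hchar, hnd, hprops, hcl⟩ := hI
  have hpP : p ∈ P := hPp.symm.mem_iff.mp List.mem_cons_self
  have hpCP : p ∈ C ++ P := List.mem_append_right _ hpP
  obtain ⟨hokp, hv0p, hRp⟩ := hprops p hpCP
  obtain ⟨new, e2, ndnew, dims', char', props', proc', cnt'⟩ :=
    foldP_post grid h w (nbrsOf p.1 p.2) v L hdv
  have hmemCP : ∀ c : Int × Int, c ∈ C ++ P ↔ c ∈ C ∨ c = p ∨ c ∈ P' := by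
    intro c
    simp only [List.mem_append, hPp.mem_iff, List.mem_cons]
  have hvCP : ∀ c : Int × Int, c ∈ C ++ P → vval v c.1 c.2 = true := by
    intro c hc
    exact (hchar c (hprops c hc).1.1).mpr (Or.inr hc)
  refine ⟨new, e2, ⟨dims', ?_, ?_, ?_, ?_⟩, ?_⟩
  · intro c hc
    rw [char' c hc, hchar c hc]
    simp only [List.mem_append, List.mem_cons, hmemCP c]
    tauto
  · have hperm : ((C ++ [p]) ++ (P' ++ new)).Perm ((C ++ P) ++ new) := by
      have e : (C ++ [p]) ++ (P' ++ new) = C ++ ((p :: P') ++ new) := by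
        simp
      rw [e]
      have h1 : ((p :: P') ++ new).Perm (P ++ new) := hPp.symm.append (List.Perm.refl new)
      calc (C ++ ((p :: P') ++ new)).Perm (C ++ (P ++ new)) :=
            h1.append_left C
        _ = (C ++ P) ++ new := by rw [List.append_assoc]
    refine hperm.nodup_iff.mpr ?_
    rw [List.nodup_append]
    refine ⟨hnd, ndnew, ?_⟩
    intro a ha b hb hab
    subst hab
    have h1 := hvCP a ha
    have h2 := (props' a hb).2.2
    rw [h1] at h2
    exact absurd h2 (by simp)
  · intro c hc
    have hc' : c ∈ C ++ P ∨ c ∈ new := by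
      rcases List.mem_append.mp hc with hc1 | hc1
      · rcases List.mem_append.mp hc1 with hc2 | hc2
        · exact Or.inl (List.mem_append_left _ hc2)
        · exact Or.inl ((hmemCP c).mpr (Or.inr (Or.inl (List.mem_singleton.mp hc2))))
      · rcases List.mem_append.mp hc1 with hc2 | hc2
        · exact Or.inl ((hmemCP c).mpr (Or.inr (Or.inr hc2)))
        · exact Or.inr hc2
    rcases hc' with hc1 | hc1
    · exact hprops c hc1
    · obtain ⟨hn1, hn2, hn3⟩ := props' c hc1
      have hv0c : vval v0 c.1 c.2 = false := by
        rcases Bool.eq_false_or_eq_true (vval v0 c.1 c.2) with ht | hf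
        · have := (hchar c hn2.1).mpr (Or.inl ht)
          rw [this] at hn3
          exact absurd hn3 (by simp)
        · exact hf
      exact ⟨hn2, hv0c, ReachG.step hRp hn1 hn2 hv0c⟩
  · intro c hc n hn hok
    rcases List.mem_append.mp hc with hc1 | hc1
    · have := hcl c hc1 n hn hok
      exact (char' n hok.1).mpr (Or.inl this)
    · have hcp : c = p := List.mem_singleton.mp hc1
      subst hcp
      exact proc' n hn hok
  · have hlen := hPp.length_eq
    simp only [List.length_cons] at hlen
    omega

theorem floodA_post (grid : List (List Int)) (h w : Int) (v0 : List (List Bool)) (s : Int × Int)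
    (fuel : Nat) :
    ∀ (stack : List (Int × Int)) (v : List (List Bool)) (comp : List (Int × Int)),
    WInv grid h w v0 s v stack comp → stack.length + cnt v ≤ fuel →
    WInv grid h w v0 s (floodA grid h w fuel stack v comp).1 []
        (floodA grid h w fuel stack v comp).2 ∧
    ∀ c ∈ comp ++ stack, c ∈ (floodA grid h w fuel stack v comp).2 := by
  induction fuel with
  | zero =>
    intro stack v comp hI hb
    have hst : stack = [] := List.length_eq_zero_iff.mp (by omega)
    subst hst
    exact ⟨hI, by simp [floodA]⟩
  | succ f ih =>
    intro stack v comp hI hb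
    cases hL : stack.getLast? with
    | none =>
      have hst : stack = [] := List.getLast?_eq_none_iff.mp hL
      subst hst
      simp only [floodA, hL]
      exact ⟨hI, by simp⟩
    | some p =>
      obtain ⟨x, y⟩ := p
      obtain ⟨ys, hys⟩ := List.getLast?_eq_some_iff.mp hL
      have hdrop : stack.dropLast = ys := by rw [hys]; exact List.dropLast_concat
      have hPp : stack.Perm ((x, y) :: stack.dropLast) := by
        rw [hys]
        rw [List.dropLast_concat]
        exact List.perm_append_singleton _ _
      obtain ⟨new, e2, hI', hm⟩ := winv_step hI hPp stack.dropLast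
      dsimp only at e2 hI' hm
      rw [← foldA_eq] at e2 hI' hm
      have hred : floodA grid h w (f + 1) stack v comp =
          floodA grid h w f (dirsA.foldl (stepA grid h w x y) (v, stack.dropLast)).2
            (dirsA.foldl (stepA grid h w x y) (v, stack.dropLast)).1 (comp ++ [(x, y)]) := by
        conv_lhs => rw [floodA]
        rw [hL]
      rw [hred, e2]
      have hb' : (stack.dropLast ++ new).length +
          cnt (dirsA.foldl (stepA grid h w x y) (v, stack.dropLast)).1 ≤ f := by
        simp only [List.length_append]
        omega
      obtain ⟨hfin, hsub⟩ := ih (stack.dropLast ++ new) _ (comp ++ [(x, y)]) hI' hb'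
      refine ⟨hfin, ?_⟩
      intro c hc
      apply hsub
      rcases List.mem_append.mp hc with hc1 | hc1
      · exact List.mem_append_left _ (List.mem_append_left _ hc1)
      · rw [hys] at hc1
        rcases List.mem_append.mp hc1 with hc2 | hc2
        · exact List.mem_append_right _ (List.mem_append_left _ (by rwa [hdrop]))
        · exact List.mem_append_left _ (List.mem_append_right _ hc2)

theorem winv_init {grid : List (List Int)} {h w : Int} {v0 : List (List Bool)} {s : Int × Int}
    (hd : dims h w v0) (hok : okc grid h w s) (hv : vval v0 s.1 s.2 = false) :
    WInv grid h w v0 s (vmark v0 s.1 s.2) [s] [] := by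
  refine ⟨dims_vmark hd s.1 s.2, ?_, by simp, ?_, by simp⟩
  · intro c hc
    rw [vmark_char hd hok.1 c hc]
    by_cases hcs : c = s
    · simp [hcs]
    · simp [hcs]
  · intro c hc
    simp only [List.nil_append, List.mem_singleton] at hc
    subst hc
    exact ⟨hok, hv, ReachG.base⟩

theorem winv_done {grid : List (List Int)} {h w : Int} {v0 vf : List (List Bool)}
    {s : Int × Int} {Cf : List (Int × Int)} (hI : WInv grid h w v0 s vf [] Cf) (hs : s ∈ Cf) :
    (∀ c : Int × Int, c ∈ Cf ↔ ReachG grid h w (freeV v0) s c) ∧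
    (∀ c : Int × Int, inb h w c →
      (vval vf c.1 c.2 = true ↔ vval v0 c.1 c.2 = true ∨ ReachG grid h w (freeV v0) s c)) := by
  obtain ⟨hdv, hchar, hnd, hprops, hcl⟩ := hI
  have hto : ∀ c : Int × Int, ReachG grid h w (freeV v0) s c → c ∈ Cf := by
    intro c hr
    induction hr with
    | base => exact hs
    | @step c' n hrc hn hok hv0 ih =>
      have h1 : vval vf n.1 n.2 = true := hcl _ (by simpa using ih) _ hn hok
      rcases (hchar n hok.1).mp h1 with h2 | h2
      · exact absurd hv0 (by simp [freeV, h2])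
      · simpa using h2
  constructor
  · intro c
    constructor
    · intro hc
      exact (hprops c (by simpa using hc)).2.2
    · exact hto c
  · intro c hc
    rw [hchar c hc]
    constructor
    · rintro (h1 | h1)
      · exact Or.inl h1
      · exact Or.inr ((hprops c h1).2.2)
    · rintro (h1 | h1)
      · exact Or.inl h1
      · exact Or.inr (by simpa using hto c h1)

-- ---------- the worklist invariant for B (seen set) ----------
def freeS (S0 : List (Int × Int)) (c : Int × Int) : Prop := c ∉ S0

def SInv (grid : List (List Int)) (h w : Int) (S0 : List (Int × Int)) (s : Int × Int)
    (S : List (Int × Int)) (P C : List (Int × Int)) : Prop :=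
  S.Nodup ∧
  (∀ c : Int × Int, c ∈ S ↔ c ∈ S0 ∨ c ∈ C ++ P) ∧
  (C ++ P).Nodup ∧
  (∀ c ∈ C ++ P, okc grid h w c ∧ c ∉ S0 ∧ ReachG grid h w (freeS S0) s c) ∧
  (∀ c ∈ C, ∀ n ∈ nbrsOf c.1 c.2, okc grid h w n → n ∈ S)

-- B's fuel measure: 5-cells not yet seen
def cntS (fives S : List (Int × Int)) : Nat :=
  (fives.filter (fun c => decide (c ∉ S))).length

theorem cntS_le (fives S : List (Int × Int)) : cntS fives S ≤ fives.length :=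
  List.length_filter_le _ _

theorem cntS_add {fives S : List (Int × Int)} {nb : Int × Int} (hnd : fives.Nodup)
    (hm : nb ∈ fives) (hns : nb ∉ S) : cntS fives (S ++ [nb]) + 1 = cntS fives S := by
  unfold cntS
  have h1 : fives.filter (fun c => decide (c ∉ S ++ [nb])) =
      (fives.filter (fun c => decide (c ∉ S))).filter (fun c => c != nb) := by
    rw [List.filter_filter]
    apply List.filter_congr
    intro x _
    by_cases hx : x ∈ S
    · simp [hx]
    · by_cases hxn : x = nb
      · simp [hxn]
      · simp [hx, hxn]
  have hL := fives.filter_sublist (p := fun c => decide (c ∉ S))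
  have hLnd : (fives.filter (fun c => decide (c ∉ S))).Nodup := hnd.sublist hL
  have hmemL : nb ∈ fives.filter (fun c => decide (c ∉ S)) := by
    rw [List.mem_filter]
    exact ⟨hm, by simpa using hns⟩
  rw [h1, ← hLnd.erase_eq_filter nb, List.length_erase_of_mem hmemL]
  have : 1 ≤ (fives.filter (fun c => decide (c ∉ S))).length := by
    exact List.length_pos_of_mem hmemL
  omega

theorem cntS_adds {fives : List (Int × Int)} (hnd : fives.Nodup) :
    ∀ (new S : List (Int × Int)), new.Nodup → (∀ n ∈ new, n ∈ fives ∧ n ∉ S) →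
    cntS fives S = cntS fives (S ++ new) + new.length := by
  intro new
  induction new with
  | nil => intro S _ _; simp
  | cons n rest ih =>
    intro S hnod hp
    have h1 := cntS_add hnd (hp n List.mem_cons_self).1 (hp n List.mem_cons_self).2
    have h2 := ih (S ++ [n]) (List.nodup_cons.mp hnod).2 ?_
    · have e : S ++ [n] ++ rest = S ++ n :: rest := by simp
      rw [e] at h2
      simp only [List.length_cons]
      omega
    · intro m hm
      refine ⟨(hp m (List.mem_cons_of_mem _ hm)).1, ?_⟩
      intro hc
      rcases List.mem_append.mp hc with hc1 | hc1
      · exact (hp m (List.mem_cons_of_mem _ hm)).2 hc1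
      · exact (List.nodup_cons.mp hnod).1 (by
          have : m = n := List.mem_singleton.mp hc1
          rwa [← this])

-- membership form of Set.contains / Set.add
theorem set_contains_iff {α : Type} [BEq α] [LawfulBEq α] (S : PySem.Set α) (x : α) :
    PySem.Set.contains S x = true ↔ x ∈ S := by
  simp [PySem.Set.contains]

theorem set_add_of_not_mem {α : Type} [BEq α] [LawfulBEq α] {S : PySem.Set α} {x : α}
    (hx : x ∉ S) : PySem.Set.add S x = S ++ [x] := by
  unfold PySem.Set.add
  rw [if_neg]
  intro hc
  exact hx ((set_contains_iff S x).mp hc)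

-- one pass over a neighbour list with probe
theorem passS_post (grid : List (List Int)) (h w : Int) (fives : List (Int × Int))
    (hfv : ∀ c : Int × Int, c ∈ fives ↔ okc grid h w c) :
    ∀ (ns S P : List (Int × Int)),
    ∃ new : List (Int × Int),
      ns.foldl (probe (PySem.Set.ofList fives)) (S, P) = (S ++ new, P ++ new) ∧
      new.Nodup ∧
      (∀ n ∈ new, n ∈ ns ∧ okc grid h w n ∧ n ∉ S) ∧
      (∀ n ∈ ns, okc grid h w n → n ∈ S ++ new) := by
  intro ns
  induction ns with
  | nil => intro S P; exact ⟨[], by simp, by simp, by simp, by simp⟩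
  | cons n rest ih =>
    intro S P
    by_cases hc : PySem.Set.contains (PySem.Set.ofList fives) n = true ∧
        PySem.Set.contains S n = false
    · have hnS : n ∉ S := by
        intro hm
        rw [← set_contains_iff S n] at hm
        rw [hm] at hc
        exact absurd hc.2 (by simp)
      have hokn : okc grid h w n := by
        have := (set_contains_iff _ n).mp hc.1
        exact (hfv n).mp ((PySem.Set.mem_ofList fives n).mp this)
      have hstep : probe (PySem.Set.ofList fives) (S, P) n = (S ++ [n], P ++ [n]) := by
        unfold probe
        rw [if_pos hc]
        simp only
        rw [set_add_of_not_mem hnS]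
      obtain ⟨new', e, nod', props', cov'⟩ := ih (S ++ [n]) (P ++ [n])
      refine ⟨n :: new', ?_, ?_, ?_, ?_⟩
      · rw [List.foldl_cons, hstep, e]
        simp
      · refine List.nodup_cons.mpr ⟨?_, nod'⟩
        intro hm
        exact (props' n hm).2.2 (List.mem_append_right _ (List.mem_singleton.mpr rfl))
      · intro m hm
        rcases List.mem_cons.mp hm with rfl | hm'
        · exact ⟨List.mem_cons_self, hokn, hnS⟩
        · obtain ⟨h1, h2, h3⟩ := props' m hm'
          refine ⟨List.mem_cons_of_mem _ h1, h2, fun hmS => h3 (List.mem_append_left _ hmS)⟩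
      · intro m hm hok
        rcases List.mem_cons.mp hm with rfl | hm'
        · have : m ∈ S ++ [m] := List.mem_append_right _ (List.mem_singleton.mpr rfl)
          have e2 : S ++ m :: new' = (S ++ [m]) ++ new' := by simp
          rw [e2]
          exact List.mem_append_left _ this
        · have := cov' m hm' hok
          have e2 : S ++ n :: new' = (S ++ [n]) ++ new' := by simp
          rw [e2]
          exact this
    · have hstep : probe (PySem.Set.ofList fives) (S, P) n = (S, P) := by
        unfold probe
        rw [if_neg hc]
      obtain ⟨new, e, nod', props', cov'⟩ := ih S P
      refine ⟨new, by rw [List.foldl_cons, hstep, e], nod', ?_, ?_⟩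
      · intro m hm
        obtain ⟨h1, h2, h3⟩ := props' m hm
        exact ⟨List.mem_cons_of_mem _ h1, h2, h3⟩
      · intro m hm hok
        rcases List.mem_cons.mp hm with rfl | hm'
        · rcases Bool.eq_false_or_eq_true (PySem.Set.contains S m) with hT | hF
          · exact List.mem_append_left _ ((set_contains_iff S m).mp hT)
          · exfalso
            apply hc
            refine ⟨?_, hF⟩
            rw [set_contains_iff]
            rw [PySem.Set.mem_ofList]
            exact (hfv m).mpr hok
        · exact cov' m hm' hok

theorem sinv_step {grid : List (List Int)} {h w : Int} {S0 : List (Int × Int)}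
    {s p : Int × Int} {S P C fives : List (Int × Int)}
    (hfv : ∀ c : Int × Int, c ∈ fives ↔ okc grid h w c) (hfnd : fives.Nodup)
    (hI : SInv grid h w S0 s S (p :: P) C) :
    ∃ new : List (Int × Int),
      (nbrsOf p.1 p.2).foldl (probe (PySem.Set.ofList fives)) (S, P) = (S ++ new, P ++ new) ∧
      SInv grid h w S0 s (S ++ new) (P ++ new) (C ++ [p]) ∧
      (P ++ new).length + cntS fives (S ++ new) + 1 = (p :: P).length + cntS fives S := by
  obtain ⟨hSnd, hchar, hnd, hprops, hcl⟩ := hI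
  have hpCP : p ∈ C ++ p :: P := List.mem_append_right _ List.mem_cons_self
  obtain ⟨hokp, hpS0, hRp⟩ := hprops p hpCP
  obtain ⟨new, e, ndnew, props', cov'⟩ := passS_post grid h w fives hfv (nbrsOf p.1 p.2) S P
  have hnewS : ∀ n ∈ new, n ∉ S := fun n hn => (props' n hn).2.2
  have hnewfives : ∀ n ∈ new, n ∈ fives := fun n hn => (hfv n).mpr (props' n hn).2.1
  refine ⟨new, e, ⟨?_, ?_, ?_, ?_, ?_⟩, ?_⟩
  · rw [List.nodup_append]
    exact ⟨hSnd, ndnew, fun a ha b hb hab => hnewS b hb (hab ▸ ha)⟩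
  · intro c
    rw [List.mem_append, hchar c]
    constructor
    · rintro ((h1 | h1) | h1)
      · exact Or.inl h1
      · rcases List.mem_append.mp h1 with h2 | h2
        · exact Or.inr (List.mem_append_left _ (List.mem_append_left _ h2))
        · rcases List.mem_cons.mp h2 with rfl | h3
          · exact Or.inr (List.mem_append_left _
              (List.mem_append_right _ (List.mem_singleton.mpr rfl)))
          · exact Or.inr (List.mem_append_right _ (List.mem_append_left _ h3))
      · exact Or.inr (List.mem_append_right _ (List.mem_append_right _ h1))
    · rintro (h1 | h1)
      · exact Or.inl (Or.inl h1)
      · rcases List.mem_append.mp h1 with h2 | h2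
        · rcases List.mem_append.mp h2 with h3 | h3
          · exact Or.inl (Or.inr (List.mem_append_left _ h3))
          · exact Or.inl (Or.inr (List.mem_append_right _
              (List.mem_cons.mpr (Or.inl (List.mem_singleton.mp h3)))))
        · rcases List.mem_append.mp h2 with h3 | h3
          · exact Or.inl (Or.inr (List.mem_append_right _ (List.mem_cons_of_mem _ h3)))
          · exact Or.inr h3
  · have hperm : ((C ++ [p]) ++ (P ++ new)).Perm ((C ++ p :: P) ++ new) := by
      have e1 : (C ++ [p]) ++ (P ++ new) = C ++ (([p] ++ P) ++ new) := by simp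
      have e2 : (C ++ p :: P) ++ new = C ++ ((p :: P) ++ new) := by simp
      rw [e1, e2]
      exact List.Perm.refl _
    refine hperm.nodup_iff.mpr ?_
    rw [List.nodup_append]
    refine ⟨hnd, ndnew, ?_⟩
    intro a ha b hb hab
    subst hab
    have h1 : a ∈ S := (hchar a).mpr (Or.inr ha)
    exact hnewS a hb h1
  · intro c hc
    have hc' : c ∈ C ++ p :: P ∨ c ∈ new := by
      rcases List.mem_append.mp hc with h1 | h1
      · rcases List.mem_append.mp h1 with h2 | h2
        · exact Or.inl (List.mem_append_left _ h2)
        · exact Or.inl (List.mem_append_right _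
            (List.mem_cons.mpr (Or.inl (List.mem_singleton.mp h2))))
      · rcases List.mem_append.mp h1 with h2 | h2
        · exact Or.inl (List.mem_append_right _ (List.mem_cons_of_mem _ h2))
        · exact Or.inr h2
    rcases hc' with h1 | h1
    · exact hprops c h1
    · obtain ⟨hn1, hn2, hn3⟩ := props' c h1
      have hcS0 : c ∉ S0 := fun hm => hn3 ((hchar c).mpr (Or.inl hm))
      exact ⟨hn2, hcS0, ReachG.step hRp hn1 hn2 hcS0⟩
  · intro c hc n hn hok
    rcases List.mem_append.mp hc with h1 | h1
    · exact List.mem_append_left _ (hcl c h1 n hn hok)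
    · have hcp : c = p := List.mem_singleton.mp h1
      subst hcp
      exact cov' n hn hok
  · have := cntS_adds hfnd new S ndnew (fun n hn => ⟨hnewfives n hn, hnewS n hn⟩)
    simp only [List.length_append, List.length_cons]
    omega

theorem bfs_post (grid : List (List Int)) (h w : Int) (S0 : List (Int × Int)) (s : Int × Int)
    (fives : List (Int × Int)) (hfv : ∀ c : Int × Int, c ∈ fives ↔ okc grid h w c)
    (hfnd : fives.Nodup) (fuel : Nat) :
    ∀ (P C S : List (Int × Int)),
    SInv grid h w S0 s S P C → P.length + cntS fives S ≤ fuel →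
    SInv grid h w S0 s (bfs (PySem.Set.ofList fives) fuel P C S).1 []
        (bfs (PySem.Set.ofList fives) fuel P C S).2 ∧
    ∀ c ∈ C ++ P, c ∈ (bfs (PySem.Set.ofList fives) fuel P C S).2 := by
  induction fuel with
  | zero =>
    intro P C S hI hb
    have hP : P = [] := List.length_eq_zero_iff.mp (by omega)
    subst hP
    refine ⟨hI, ?_⟩
    intro c hc
    rw [List.append_nil] at hc
    exact hc
  | succ f ih =>
    intro P C S hI hb
    cases P with
    | nil =>
      refine ⟨hI, ?_⟩
      intro c hc
      rw [List.append_nil] at hc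
      exact hc
    | cons p rest =>
      obtain ⟨x, y⟩ := p
      obtain ⟨new, e, hI', hm⟩ := sinv_step hfv hfnd hI
      have hred : bfs (PySem.Set.ofList fives) (f + 1) ((x, y) :: rest) C S =
          bfs (PySem.Set.ofList fives) f
            ((nbrsOf x y).foldl (probe (PySem.Set.ofList fives)) (S, rest)).2
            (C ++ [(x, y)])
            ((nbrsOf x y).foldl (probe (PySem.Set.ofList fives)) (S, rest)).1 := rfl
      rw [hred, e]
      obtain ⟨hfin, hsub⟩ := ih (rest ++ new) (C ++ [(x, y)]) (S ++ new) hI' (by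
        simp only [List.length_cons, List.length_append] at hb hm ⊢
        omega)
      refine ⟨hfin, ?_⟩
      intro c hc
      apply hsub
      rcases List.mem_append.mp hc with h1 | h1
      · exact List.mem_append_left _ (List.mem_append_left _ h1)
      · rcases List.mem_cons.mp h1 with rfl | h2
        · exact List.mem_append_left _
            (List.mem_append_right _ (List.mem_singleton.mpr rfl))
        · exact List.mem_append_right _ (List.mem_append_left _ h2)

theorem sinv_init {grid : List (List Int)} {h w : Int} {S0 : List (Int × Int)} {s : Int × Int}
    (hS0nd : S0.Nodup) (hok : okc grid h w s) (hs : s ∉ S0) :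
    SInv grid h w S0 s (S0 ++ [s]) [s] [] := by
  refine ⟨?_, ?_, by simp, ?_, by simp⟩
  · rw [List.nodup_append]
    exact ⟨hS0nd, List.nodup_singleton s, by
      intro a ha b hb hab
      subst hab
      rw [List.mem_singleton] at hb
      subst hb
      exact hs ha⟩
  · intro c
    simp [List.mem_append]
  · intro c hc
    simp only [List.nil_append, List.mem_singleton] at hc
    subst hc
    exact ⟨hok, hs, ReachG.base⟩

theorem sinv_done {grid : List (List Int)} {h w : Int} {S0 : List (Int × Int)}
    {s : Int × Int} {Sf Cf : List (Int × Int)} (hI : SInv grid h w S0 s Sf [] Cf)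
    (hs : s ∈ Cf) :
    (∀ c : Int × Int, c ∈ Cf ↔ ReachG grid h w (freeS S0) s c) ∧
    (∀ c : Int × Int, c ∈ Sf ↔ c ∈ S0 ∨ ReachG grid h w (freeS S0) s c) := by
  obtain ⟨hSnd, hchar, hnd, hprops, hcl⟩ := hI
  have hto : ∀ c : Int × Int, ReachG grid h w (freeS S0) s c → c ∈ Cf := by
    intro c hr
    induction hr with
    | base => exact hs
    | @step c' n hrc hn hok hfree ih =>
      have h1 : n ∈ Sf := hcl _ (by simpa using ih) _ hn hok
      rcases (hchar n).mp h1 with h2 | h2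
      · exact absurd h2 hfree
      · simpa using h2
  constructor
  · intro c
    exact ⟨fun hc => (hprops c (by simpa using hc)).2.2, hto c⟩
  · intro c
    rw [hchar c]
    constructor
    · rintro (h1 | h1)
      · exact Or.inl h1
      · exact Or.inr ((hprops c (by simpa using h1)).2.2)
    · rintro (h1 | h1)
      · exact Or.inl h1
      · exact Or.inr (by simpa using hto c h1)

-- ---------- the five-cell list ----------
theorem gval_nonneg (grid : List (List Int)) (i j : Int) (hi : 0 ≤ i) (hj : 0 ≤ j) :
    gval grid i j = (grid.getD i.toNat []).getD j.toNat 0 := by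
  simp [gval, PySem.List.pyGet?_of_nonneg _ hi, PySem.List.pyGet?_of_nonneg _ hj,
    List.getD_eq_getElem?_getD]

def allPairs (h w : Int) : List (Int × Int) :=
  PySem.List.pyRange 0 h 1 ×ˢ PySem.List.pyRange 0 w 1

theorem fivesOf_eq_filter (grid : List (List Int)) :
    fivesOf grid = (allPairs (grid.length : Int) ((grid.headI).length : Int)).filter
      (fun c => decide (gval grid c.1 c.2 = 5)) := by
  unfold fivesOf allPairs
  show _ = List.filter _ (List.flatMap _ _)
  rw [List.filter_flatMap, List.flatMap_def, List.flatMap_def]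
  apply congrArg List.flatten
  apply List.map_congr_left
  intro i hi
  have hi0 : 0 ≤ i := (PySem.List.mem_pyRange_one.mp hi).1
  rw [List.filter_map]
  apply congrArg
  apply List.filter_congr
  intro j hj
  have hj0 : 0 ≤ j := (PySem.List.mem_pyRange_one.mp hj).1
  simp [Function.comp, gval_nonneg grid i j hi0 hj0]

theorem mem_fivesOf (grid : List (List Int)) (c : Int × Int) :
    c ∈ fivesOf grid ↔ okc grid (grid.length : Int) ((grid.headI).length : Int) c := by
  rw [fivesOf_eq_filter, List.mem_filter]
  obtain ⟨i, j⟩ := c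
  unfold allPairs okc inb
  rw [show (PySem.List.pyRange 0 (grid.length : Int) 1 ×ˢ
      PySem.List.pyRange 0 ((grid.headI).length : Int) 1) =
      (PySem.List.pyRange 0 (grid.length : Int) 1).product
        (PySem.List.pyRange 0 ((grid.headI).length : Int) 1) from rfl,
    List.pair_mem_product, PySem.List.mem_pyRange_one, PySem.List.mem_pyRange_one]
  simp only [decide_eq_true_eq]
  tauto

theorem nodup_fivesOf (grid : List (List Int)) : (fivesOf grid).Nodup := by
  rw [fivesOf_eq_filter]
  exact (List.Nodup.product (PySem.List.nodup_pyRange_one _ _) (PySem.List.nodup_pyRange_one _ _)).filter _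

theorem length_fivesOf (grid : List (List Int)) :
    (fivesOf grid).length ≤ grid.length * (grid.headI).length := by
  rw [fivesOf_eq_filter]
  calc _ ≤ (allPairs (grid.length : Int) ((grid.headI).length : Int)).length :=
        List.length_filter_le _ _
    _ = _ := by
        unfold allPairs
        rw [List.length_product, PySem.List.length_pyRange_one, PySem.List.length_pyRange_one]
        simp

-- ---------- alignment of the two scans ----------
-- A's per-cell body
def bodyA (grid : List (List Int)) (st : List (List Bool) × List (List (Int × Int)))
    (c : Int × Int) : List (List Bool) × List (List (Int × Int)) :=
  if gval grid c.1 c.2 = 5 ∧ vval st.1 c.1 c.2 = false then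
    let r := floodA grid (grid.length : Int) ((grid.headI).length : Int)
      ((grid.length : Int).toNat * ((grid.headI).length : Int).toNat + 1)
      [c] (vmark st.1 c.1 c.2) []
    (r.1, st.2 ++ [r.2])
  else st

-- B's per-cell body
def bodyB (grid : List (List Int)) (st : PySem.Set (Int × Int) × List (List (Int × Int)))
    (cell : Int × Int) : PySem.Set (Int × Int) × List (List (Int × Int)) :=
  if PySem.Set.contains st.1 cell = true then st
  else
    let r := bfs (PySem.Set.ofList (fivesOf grid)) (grid.length * (grid.headI).length + 1)
      [cell] [] (PySem.Set.add st.1 cell)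
    (r.1, st.2 ++ [r.2])

def initA (grid : List (List Int)) : List (List Bool) × List (List (Int × Int)) :=
  (List.replicate (grid.length : Int).toNat
    (List.replicate ((grid.headI).length : Int).toNat false), [])

theorem transform_unfold (grid : List (List Int)) :
    transform grid = recolorA grid 0 (PySem.List.sorted
      (((PySem.List.pyRange 0 (grid.length : Int) 1).foldl (fun st i =>
        (PySem.List.pyRange 0 ((grid.headI).length : Int) 1).foldl
          (fun st j => bodyA grid st (i, j)) st) (initA grid)).2)
      (fun c => c.length) true) := rfl

theorem alt_unfold (grid : List (List Int)) :
    transform_alt grid =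
      (colourOrder.zip (PySem.List.sorted
        (((fivesOf grid).foldl (bodyB grid) ([], [])).2) (fun c => c.length) true)).foldl
        (fun g cc => cc.2.foldl (fun g p => putCell g cc.1 p) g) grid := rfl

theorem scanA_eq_fives (grid : List (List Int)) :
    (PySem.List.pyRange 0 (grid.length : Int) 1).foldl (fun st i =>
      (PySem.List.pyRange 0 ((grid.headI).length : Int) 1).foldl
        (fun st j => bodyA grid st (i, j)) st) (initA grid) =
    (fivesOf grid).foldl (bodyA grid) (initA grid) := by
  have h1 : (PySem.List.pyRange 0 (grid.length : Int) 1).foldl (fun st i =>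
      (PySem.List.pyRange 0 ((grid.headI).length : Int) 1).foldl
        (fun st j => bodyA grid st (i, j)) st) (initA grid) =
      (allPairs (grid.length : Int) ((grid.headI).length : Int)).foldl (bodyA grid)
        (initA grid) := by
    unfold allPairs
    show _ = List.foldl _ _ (List.flatMap _ _)
    rw [List.foldl_flatMap]
    apply PySem.List.foldl_congr_mem
    intro acc i _
    rw [List.foldl_map]
  rw [h1, fivesOf_eq_filter, List.foldl_filter]
  apply PySem.List.foldl_congr_mem
  intro acc c _
  by_cases hc : gval grid c.1 c.2 = 5
  · rw [if_pos (by simpa using hc)]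
  · rw [if_neg (by simpa using hc)]
    unfold bodyA
    rw [if_neg (by tauto)]

theorem forall₂_append_my {α β : Type} {R : α → β → Prop} {l₁ u₁ : List α} {l₂ u₂ : List β}
    (h1 : List.Forall₂ R l₁ l₂) (h2 : List.Forall₂ R u₁ u₂) :
    List.Forall₂ R (l₁ ++ u₁) (l₂ ++ u₂) := by
  induction h1 with
  | nil => exact h2
  | cons h _ ih => exact List.Forall₂.cons h ih

-- the relation between A's and B's scan states
def BRel (grid : List (List Int)) (h w : Int)
    (a : List (List Bool) × List (List (Int × Int)))
    (b : PySem.Set (Int × Int) × List (List (Int × Int))) : Prop :=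
  dims h w a.1 ∧ b.1.Nodup ∧
  (∀ c : Int × Int, c ∈ b.1 ↔ okc grid h w c ∧ vval a.1 c.1 c.2 = true) ∧
  List.Forall₂ List.Perm a.2 b.2 ∧
  (∀ comp ∈ b.2, ∀ p ∈ comp, okc grid h w p)

theorem pyGet?_mem {α : Type} {xs : List α} {i : Int} {a : α}
    (h : PySem.List.pyGet? xs i = some a) : a ∈ xs := by
  unfold PySem.List.pyGet? at h
  rcases hidx : PySem.List.pyIdx? xs.length i with _ | k
  · rw [hidx] at h
    simp at h
  · rw [hidx] at h
    exact List.mem_of_getElem? (by simpa using h)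

theorem vval_blank (m n : Nat) (x y : Int) :
    vval (List.replicate m (List.replicate n false)) x y = false := by
  unfold vval
  rcases hrow : PySem.List.pyGet? (List.replicate m (List.replicate n false)) x with _ | row
  · simp [PySem.List.pyGet?, PySem.List.pyIdx?]
  · have hr := List.eq_of_mem_replicate (pyGet?_mem hrow)
    subst hr
    rw [Option.getD_some]
    rcases he : PySem.List.pyGet? (List.replicate n false) y with _ | b
    · rfl
    · rw [List.eq_of_mem_replicate (pyGet?_mem he)]
      rfl

theorem brel_init (grid : List (List Int)) :
    BRel grid (grid.length : Int) ((grid.headI).length : Int) (initA grid) ([], []) := by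
  refine ⟨⟨by simp [initA], ?_⟩, by simp, ?_, List.Forall₂.nil, by simp⟩
  · intro r hr
    rw [List.eq_of_mem_replicate hr]
    simp
  · intro c
    simp [initA, vval_blank]

theorem brel_step (grid : List (List Int)) (cell : Int × Int)
    (hcell : cell ∈ fivesOf grid)
    (a : List (List Bool) × List (List (Int × Int)))
    (b : PySem.Set (Int × Int) × List (List (Int × Int)))
    (hR : BRel grid (grid.length : Int) ((grid.headI).length : Int) a b) :
    BRel grid (grid.length : Int) ((grid.headI).length : Int)
      (bodyA grid a cell) (bodyB grid b cell) := by
  obtain ⟨hdim, hSnd, hchar, hF, hokk⟩ := hR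
  set h : Int := (grid.length : Int) with hh
  set w : Int := ((grid.headI).length : Int) with hw
  have hok : okc grid h w cell := (mem_fivesOf grid cell).mp hcell
  by_cases hseen : cell ∈ b.1
  · -- already visited: both sides skip
    have hvt : vval a.1 cell.1 cell.2 = true := ((hchar cell).mp hseen).2
    have hA : bodyA grid a cell = a := by
      unfold bodyA
      rw [if_neg (by rw [hvt]; tauto)]
    have hB : bodyB grid b cell = b := by
      unfold bodyB
      rw [if_pos ((set_contains_iff b.1 cell).mpr hseen)]
    rw [hA, hB]
    exact ⟨hdim, hSnd, hchar, hF, hokk⟩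
  · have hvf : vval a.1 cell.1 cell.2 = false := by
      rcases Bool.eq_false_or_eq_true (vval a.1 cell.1 cell.2) with hT | hFf
      · exact absurd ((hchar cell).mpr ⟨hok, hT⟩) hseen
      · exact hFf
    have hA : bodyA grid a cell =
        ((floodA grid h w (h.toNat * w.toNat + 1) [cell] (vmark a.1 cell.1 cell.2) []).1,
         a.2 ++ [(floodA grid h w (h.toNat * w.toNat + 1) [cell]
            (vmark a.1 cell.1 cell.2) []).2]) := by
      unfold bodyA
      rw [if_pos ⟨hok.2, hvf⟩]
    have hB : bodyB grid b cell =
        ((bfs (PySem.Set.ofList (fivesOf grid)) (grid.length * (grid.headI).length + 1)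
            [cell] [] (b.1 ++ [cell])).1,
         b.2 ++ [(bfs (PySem.Set.ofList (fivesOf grid)) (grid.length * (grid.headI).length + 1)
            [cell] [] (b.1 ++ [cell])).2]) := by
      unfold bodyB
      rw [if_neg (by
        intro hcb
        exact hseen ((set_contains_iff b.1 cell).mp hcb))]
      rw [set_add_of_not_mem hseen]
    -- A's flood
    have hinit := winv_init (grid := grid) (h := h) (w := w) hdim hok hvf
    have hcnt : cnt (vmark a.1 cell.1 cell.2) + 1 = cnt a.1 := cnt_vmark hdim hok.1 hvf
    have hcle : cnt a.1 ≤ h.toNat * w.toNat := cnt_le hdim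
    obtain ⟨hIA, hmA⟩ := floodA_post grid h w a.1 cell (h.toNat * w.toNat + 1)
      [cell] (vmark a.1 cell.1 cell.2) [] hinit (by
        simp only [List.length_cons, List.length_nil]
        omega)
    set RA := floodA grid h w (h.toNat * w.toNat + 1) [cell] (vmark a.1 cell.1 cell.2) []
      with hRA
    have hsA : cell ∈ RA.2 := hmA cell (by simp)
    obtain ⟨memA, charA⟩ := winv_done hIA hsA
    have ndA : RA.2.Nodup := by simpa using hIA.2.2.1
    have dimsA : dims h w RA.1 := hIA.1
    -- B's bfs
    have hfv := mem_fivesOf grid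
    have hfnd := nodup_fivesOf grid
    have hinitB := sinv_init (grid := grid) (h := h) (w := w) (S0 := b.1) hSnd hok hseen
    have hcntS : cntS (fivesOf grid) (b.1 ++ [cell]) + 1 ≤
        grid.length * (grid.headI).length + 1 := by
      have h1 := cntS_le (fivesOf grid) (b.1 ++ [cell])
      have h2 := length_fivesOf grid
      omega
    obtain ⟨hIB, hmB⟩ := bfs_post grid h w b.1 cell (fivesOf grid) hfv hfnd
      (grid.length * (grid.headI).length + 1) [cell] [] (b.1 ++ [cell]) hinitB (by
        simp only [List.length_cons, List.length_nil]
        omega)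
    set RB := bfs (PySem.Set.ofList (fivesOf grid)) (grid.length * (grid.headI).length + 1)
      [cell] [] (b.1 ++ [cell]) with hRB
    have hsB : cell ∈ RB.2 := hmB cell (by simp)
    obtain ⟨memB, charB⟩ := sinv_done hIB hsB
    have ndB : RB.2.Nodup := by simpa using hIB.2.2.1
    have ndSB : RB.1.Nodup := hIB.1
    have okB : ∀ c ∈ RB.2, okc grid h w c := by
      intro c hc
      exact (hIB.2.2.2.1 c (by simpa using hc)).1
    -- free predicates agree on ok cells
    have hfree : ∀ d : Int × Int, okc grid h w d → (freeV a.1 d ↔ freeS b.1 d) := by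
      intro d hd
      unfold freeV freeS
      rw [hchar d]
      rcases Bool.eq_false_or_eq_true (vval a.1 d.1 d.2) with hT | hFf
      · simp [hT, hd]
      · simp [hFf]
    have hreach : ∀ c : Int × Int,
        ReachG grid h w (freeV a.1) cell c ↔ ReachG grid h w (freeS b.1) cell c :=
      fun c => ⟨reach_mono (fun d hd => (hfree d hd).mp),
        reach_mono (fun d hd => (hfree d hd).mpr)⟩
    -- components are permutations of each other
    have hperm : RA.2.Perm RB.2 := by
      rw [List.perm_ext_iff_of_nodup ndA ndB]
      intro c
      rw [memA c, memB c, hreach c]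
    rw [hA, hB]
    refine ⟨dimsA, ndSB, ?_, ?_, ?_⟩
    · intro c
      rw [charB c]
      constructor
      · rintro (h1 | h1)
        · obtain ⟨hok1, hv1⟩ := (hchar c).mp h1
          exact ⟨hok1, (charA c hok1.1).mpr (Or.inl hv1)⟩
        · have hokc : okc grid h w c := reach_ok hok ((hreach c).mpr h1)
          exact ⟨hokc, (charA c hokc.1).mpr (Or.inr ((hreach c).mpr h1))⟩
      · rintro ⟨hok1, hv1⟩
        rcases (charA c hok1.1).mp hv1 with h1 | h1
        · exact Or.inl ((hchar c).mpr ⟨hok1, h1⟩)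
        · exact Or.inr ((hreach c).mp h1)
    · exact forall₂_append_my hF (List.Forall₂.cons hperm List.Forall₂.nil)
    · intro comp hcomp p hp
      rcases List.mem_append.mp hcomp with h1 | h1
      · exact hokk comp h1 p hp
      · rw [List.mem_singleton.mp h1] at hp
        exact okB p hp

-- generic parallel fold
theorem foldl_rel {α β γ : Type} {R : α → β → Prop} {f : α → γ → α} {g : β → γ → β}
    (l : List γ) (a : α) (b : β) (h : R a b)
    (hs : ∀ x ∈ l, ∀ a b, R a b → R (f a x) (g b x)) :
    R (l.foldl f a) (l.foldl g b) := by
  induction l generalizing a b with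
  | nil => exact h
  | cons x xs ih =>
    exact ih _ _ (hs x List.mem_cons_self a b h)
      (fun y hy => hs y (List.mem_cons_of_mem _ hy))

-- ---------- stable sort respects pointwise permutation ----------
theorem insertBy_rel {x y : List (Int × Int)} (hxy : x.Perm y) :
    ∀ {acc₁ acc₂ : List (List (Int × Int))}, List.Forall₂ List.Perm acc₁ acc₂ →
    List.Forall₂ List.Perm
      (PySem.List.insertBy (fun a b => decide (b.length < a.length)) x acc₁)
      (PySem.List.insertBy (fun a b => decide (b.length < a.length)) y acc₂) := by
  intro acc₁ acc₂ hacc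
  induction hacc with
  | nil =>
    simp only [PySem.List.insertBy]
    exact List.Forall₂.cons hxy List.Forall₂.nil
  | @cons a b l₁ l₂ hab htl ih =>
    have e1 : PySem.List.insertBy (fun a b => decide (b.length < a.length)) x (a :: l₁) =
        if decide (a.length < x.length) = true then x :: a :: l₁
        else a :: PySem.List.insertBy (fun a b => decide (b.length < a.length)) x l₁ := by
      simp [PySem.List.insertBy]
    have e2 : PySem.List.insertBy (fun a b => decide (b.length < a.length)) y (b :: l₂) =
        if decide (b.length < y.length) = true then y :: b :: l₂
        else b :: PySem.List.insertBy (fun a b => decide (b.length < a.length)) y l₂ := by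
      simp [PySem.List.insertBy]
    rw [e1, e2, ← hab.length_eq, ← hxy.length_eq]
    split
    · exact List.Forall₂.cons hxy (List.Forall₂.cons hab htl)
    · exact List.Forall₂.cons hab ih

theorem sorted_rel {l₁ l₂ : List (List (Int × Int))} (h : List.Forall₂ List.Perm l₁ l₂) :
    List.Forall₂ List.Perm (PySem.List.sorted l₁ (fun c => c.length) true)
      (PySem.List.sorted l₂ (fun c => c.length) true) := by
  rw [PySem.List.sorted_rev_eq_foldl_insertBy, PySem.List.sorted_rev_eq_foldl_insertBy]
  have hgen : ∀ {a₁ a₂ : List (List (Int × Int))}, List.Forall₂ List.Perm a₁ a₂ →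
      List.Forall₂ List.Perm
        (l₁.foldl (fun acc x =>
          PySem.List.insertBy (fun a b => decide (b.length < a.length)) x acc) a₁)
        (l₂.foldl (fun acc x =>
          PySem.List.insertBy (fun a b => decide (b.length < a.length)) x acc) a₂) := by
    induction h with
    | nil => intro a₁ a₂ ha; exact ha
    | cons hab htl ih => intro a₁ a₂ ha; exact ih (insertBy_rel hab ha)
  exact hgen List.Forall₂.nil

-- ---------- the recolouring phase ----------
theorem recolor_eq (g : List (List Int)) {sA sB : List (List (Int × Int))}
    (hrel : List.Forall₂ List.Perm sA sB) :
    recolorA g 0 sA =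
      (colourOrder.zip sB).foldl (fun gg cc => paint gg cc.1 cc.2) g := by
  have econs : ∀ (gg : List (List Int)) (idx : Nat) (c : List (Int × Int))
      (cs : List (List (Int × Int))), recolorA gg idx (c :: cs) =
        if colourOrder.length ≤ idx then gg
        else recolorA (paint gg (PySem.List.pyGetD colourOrder (idx : Int) 0) c) (idx + 1) cs :=
    fun _ _ _ _ => rfl
  have hcol0 : PySem.List.pyGetD colourOrder ((0 : Nat) : Int) 0 = 1 := by
    rw [PySem.List.pyGetD_natCast]; rfl
  have hcol1 : PySem.List.pyGetD colourOrder ((0 + 1 : Nat) : Int) 0 = 4 := by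
    rw [PySem.List.pyGetD_natCast]; rfl
  have hcol2 : PySem.List.pyGetD colourOrder ((0 + 1 + 1 : Nat) : Int) 0 = 2 := by
    rw [PySem.List.pyGetD_natCast]; rfl
  have hlen : colourOrder.length = 3 := rfl
  cases hrel with
  | nil => simp [recolorA, colourOrder]
  | @cons c0 d0 t1 u1 h0 htl1 =>
    cases htl1 with
    | nil =>
      rw [econs, hlen, if_neg (by omega), hcol0]
      show recolorA (paint g 1 c0) (0 + 1) [] = _
      rw [show recolorA (paint g 1 c0) (0 + 1) [] = paint g 1 c0 from rfl]
      simp only [colourOrder, List.zip_cons_cons, List.zip_nil_right, List.foldl_cons,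
        List.foldl_nil]
      exact paint_perm g 1 h0
    | @cons c1 d1 t2 u2 h1 htl2 =>
      cases htl2 with
      | nil =>
        rw [econs, hlen, if_neg (by omega), hcol0, econs, hlen, if_neg (by omega), hcol1]
        rw [show recolorA (paint (paint g 1 c0) 4 c1) (0 + 1 + 1) [] =
          paint (paint g 1 c0) 4 c1 from rfl]
        simp only [colourOrder, List.zip_cons_cons, List.zip_nil_right, List.foldl_cons,
          List.foldl_nil]
        rw [paint_perm g 1 h0]
        exact paint_perm _ 4 h1
      | @cons c2 d2 t3 u3 h2 htl3 =>
        rw [econs, hlen, if_neg (by omega), hcol0, econs, hlen, if_neg (by omega), hcol1,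
          econs, hlen, if_neg (by omega), hcol2]
        have hA3 : recolorA (paint (paint (paint g 1 c0) 4 c1) 2 c2) (0 + 1 + 1 + 1) t3 =
            paint (paint (paint g 1 c0) 4 c1) 2 c2 := by
          cases t3 with
          | nil => rfl
          | cons c cs => rw [econs, hlen, if_pos (by omega)]
        rw [hA3]
        simp only [colourOrder, List.zip_cons_cons, List.zip_nil_left, List.foldl_cons,
          List.foldl_nil]
        rw [paint_perm g 1 h0]
        rw [paint_perm _ 4 h1]
        exact paint_perm _ 2 h2

theorem transform_eq_alt (grid : List (List Int)) : transform grid = transform_alt grid := by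
  rw [transform_unfold, alt_unfold, scanA_eq_fives]
  have hR := foldl_rel (R := BRel grid (grid.length : Int) ((grid.headI).length : Int))
    (fivesOf grid) (initA grid) (([], []) : PySem.Set (Int × Int) × List (List (Int × Int)))
    (brel_init grid) (fun cell hcell a b hab => brel_step grid cell hcell a b hab)
  set sb := ((fivesOf grid).foldl (bodyB grid) ([], [])).2 with hsb
  obtain ⟨_, _, _, hF, hokk⟩ := hR
  have hsorted := sorted_rel hF
  have hokS : ∀ comp ∈ PySem.List.sorted sb (fun c => c.length) true,
      ∀ p ∈ comp, 0 ≤ p.1 ∧ 0 ≤ p.2 := by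
    intro comp hc p hp
    have := hokk comp ((PySem.List.mem_sorted sb _ true comp).mp hc) p hp
    exact ⟨this.1.1, this.1.2.2.1⟩
  rw [recolor_eq grid hsorted]
  apply PySem.List.foldl_congr_mem
  intro acc cc hcc
  have h2 := (List.of_mem_zip hcc).2
  exact (foldl_putCell cc.1 cc.2 acc (hokS cc.2 h2)).symm

-- ===== VERDICT (by name: the statement is the Claim_ definition above) =====
theorem transform_spec : Claim_equal_transform := by
  intro grid _ _
  unfold Spec_transform
  exact transform_eq_alt grid
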